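-- pv_equiv track=rewrite | github.com/KimKeunSoo/KNUCouncil_Seat_Program | src/module.py | get_Low_proportional
-- ===== SOURCE A (Python) =====
-- def get_Low_proportional(max_Seat, max_College, minimal_N, max_Associate, associated_Seat, priority_Initial, priority_Sorted, fixed_Seat, College_Direct):
--     low_Proportional_Seat = [0 for i in range(max_College)]  # 반환할 값 초기화&할당
--     is_Low_College = [0 for i in range(max_College)]  # 소수 단과대학인지 판별할 리스트 초기화
--     max_Low_Seat = int(max_Seat/2)  # 소수 단과 대학일지 판별한 기준 값(단과대학별 최대 할당 위원수/2)
--     for i in range(max_College):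
--         # 소수 단과 대학 판별 후 flag 1값 설정
--         if((max_Low_Seat > associated_Seat[i]) & (max_Seat > fixed_Seat[i] + College_Direct[i])):
--             is_Low_College[i] = 1
--
--     index = max_Associate    # 총 할당 위원 maxAssociate 값부터 탐색
--     low_Max = int(minimal_N/4)    # 소수 비례 의석에 할당할 수
--     times = 0   # 할당 횟수
--
--     while(times < low_Max):
--         breakAll = True
--         value = priority_Sorted[index]  # 탐색할 값
--         while(breakAll):
--             for row in range(max_College):   # 2차원 대조군-행
--                 for col in range(max_Seat):  # 2차원 대조군-열
--                     # 값 탐색 후 소수 단과대학 일때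
--                     if (value == priority_Initial[row][col]):
--                         if is_Low_College[row] != 0:
--                             # 해당 단과대학 소수 비례 의원 수 + 1
--                             low_Proportional_Seat[row] += 1
--                             times += 1  # 할당 횟수 + 1
--                         index += 1
--                         breakAll = False
--     return low_Proportional_Seat
-- ===== SOURCE B (Python) =====
-- def get_Low_proportional(max_Seat, max_College, minimal_N, max_Associate, associated_Seat, priority_Initial, priority_Sorted, fixed_Seat, College_Direct):
--     low_Proportional_Seat = [0] * max(max_College, 0)
--     max_Low_Seat = int(max_Seat / 2)
--     is_Low_College = [1 if (max_Low_Seat > associated_Seat[i]) and (max_Seat > fixed_Seat[i] + College_Direct[i]) else 0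
--                       for i in range(max_College)]
--     # one row-major scan builds a first-occurrence map: priority value -> its college row
--     row_of = {}
--     for row, cells in enumerate(priority_Initial[:max_College]):
--         for v in cells[:max_Seat]:
--             if v not in row_of:
--                 row_of[v] = row
--     low_Max = int(minimal_N / 4)
--     index = max_Associate
--     times = 0
--     while times < low_Max:
--         row = row_of[priority_Sorted[index]]
--         index += 1
--         if is_Low_College[row]:
--             low_Proportional_Seat[row] += 1
--             times += 1
--     return low_Proportional_Seat
-- ===== Notes on version B (the rewrite author's own statement) =====
-- stated objective: faster
-- what changed: B builds a first-occurrence dict (priority value -> college row) in one row-major scan and replaces A's repeated full grid re-scans (while/breakAll/nested for) with a single forward walk over priority_Sorted doing one dict lookup per step.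
import Mathlib
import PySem

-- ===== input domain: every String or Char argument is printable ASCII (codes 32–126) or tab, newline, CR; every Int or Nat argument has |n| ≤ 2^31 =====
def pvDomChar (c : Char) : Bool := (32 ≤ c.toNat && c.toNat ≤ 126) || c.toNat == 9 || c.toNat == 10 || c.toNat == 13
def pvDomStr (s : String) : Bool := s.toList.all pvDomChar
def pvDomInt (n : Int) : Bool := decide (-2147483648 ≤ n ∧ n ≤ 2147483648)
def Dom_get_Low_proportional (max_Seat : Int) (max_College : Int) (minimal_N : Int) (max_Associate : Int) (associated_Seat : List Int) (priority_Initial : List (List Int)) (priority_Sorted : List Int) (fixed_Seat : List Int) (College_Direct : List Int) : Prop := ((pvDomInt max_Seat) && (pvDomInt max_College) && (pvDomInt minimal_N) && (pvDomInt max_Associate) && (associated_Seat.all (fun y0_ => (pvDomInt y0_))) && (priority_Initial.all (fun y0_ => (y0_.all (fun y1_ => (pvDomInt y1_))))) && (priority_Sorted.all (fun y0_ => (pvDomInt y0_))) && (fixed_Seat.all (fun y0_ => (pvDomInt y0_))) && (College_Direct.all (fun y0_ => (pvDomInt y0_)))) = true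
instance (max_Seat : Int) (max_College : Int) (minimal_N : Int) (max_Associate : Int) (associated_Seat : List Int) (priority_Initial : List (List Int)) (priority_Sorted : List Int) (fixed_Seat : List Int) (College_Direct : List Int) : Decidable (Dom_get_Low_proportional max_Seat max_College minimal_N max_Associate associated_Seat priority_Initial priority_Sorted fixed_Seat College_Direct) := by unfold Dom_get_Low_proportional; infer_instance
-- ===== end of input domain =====

-- B replaces A's per-seat full grid re-scans by one first-occurrence dict built in a single
-- row-major scan plus one forward walk over priority_Sorted (objective: faster).
-- Pre_ excludes duplicate priority values in the scanned grid region, on which A's missing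
-- `break` multiply-counts one priority (an artefact of the never-firing breakAll flag), and
-- the inputs where A raises (IndexError) or loops forever.

-- ===== PORT A =====
-- one full scan of the grid = the body of Python's inner `while(breakAll)` loop (the double for);
-- state: (low_Proportional_Seat, times, index, breakAll)
def pvA_pass (max_Seat max_College : Int) (priority_Initial : List (List Int))
    (is_Low_College : List Int) (value : Int)
    (st : List Int × Int × Int × Bool) : List Int × Int × Int × Bool :=
  (PySem.List.pyRange 0 max_College 1).foldl (fun st row =>
    (PySem.List.pyRange 0 max_Seat 1).foldl (fun st col =>
      match PySem.List.pyGet? (PySem.List.pyGetD priority_Initial row []) col with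
      | none => st      -- Python raises IndexError here; excluded by Pre_
      | some cell =>
        if value = cell then
          if PySem.List.pyGetD is_Low_College row 0 ≠ 0 then
            (PySem.List.pySetD st.1 row (PySem.List.pyGetD st.1 row 0 + 1), st.2.1 + 1, st.2.2.1 + 1, false)
          else (st.1, st.2.1, st.2.2.1 + 1, false)
        else st) st) st

-- Python's outer `while(times < low_Max)`; fuel only makes it total (A's loop either raises,
-- diverges, or returns within priority_Sorted.length + |max_Associate| steps)
def pvA_loop (low_Max max_Seat max_College : Int) (priority_Initial : List (List Int))
    (priority_Sorted : List Int) (is_Low_College : List Int) :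
    Nat → List Int → Int → Int → List Int
  | 0, seat, _, _ => seat    -- fuel exhausted: unreachable under Pre_
  | fuel + 1, seat, times, index =>
    if times < low_Max then
      match PySem.List.pyGet? priority_Sorted index with
      | none => seat         -- Python raises IndexError; excluded by Pre_
      | some value =>
        let st := pvA_pass max_Seat max_College priority_Initial is_Low_College value (seat, times, index, true)
        if st.2.2.2 then st.1   -- breakAll still True: Python loops forever; excluded by Pre_
        else pvA_loop low_Max max_Seat max_College priority_Initial priority_Sorted is_Low_College fuel st.1 st.2.1 st.2.2.1
    else seat

def get_Low_proportional (max_Seat : Int) (max_College : Int) (minimal_N : Int) (max_Associate : Int) (associated_Seat : List Int) (priority_Initial : List (List Int)) (priority_Sorted : List Int) (fixed_Seat : List Int) (College_Direct : List Int) : List Int :=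
  let low_Proportional_Seat := (PySem.List.pyRange 0 max_College 1).map (fun _ => (0 : Int))
  let is_Low_College0 := (PySem.List.pyRange 0 max_College 1).map (fun _ => (0 : Int))
  let max_Low_Seat := PySem.Int.truncdiv max_Seat 2   -- int(max_Seat/2), exact for |max_Seat| ≤ 2^31
  let is_Low_College := (PySem.List.pyRange 0 max_College 1).foldl (fun l i =>
      if max_Low_Seat > PySem.List.pyGetD associated_Seat i 0 ∧
         max_Seat > PySem.List.pyGetD fixed_Seat i 0 + PySem.List.pyGetD College_Direct i 0 then
        PySem.List.pySetD l i 1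
      else l) is_Low_College0
  let low_Max := PySem.Int.truncdiv minimal_N 4       -- int(minimal_N/4)
  pvA_loop low_Max max_Seat max_College priority_Initial priority_Sorted is_Low_College
    (priority_Sorted.length + max_Associate.natAbs + 1) low_Proportional_Seat 0 max_Associate

-- ===== PORT B =====
-- single forward walk: one dict lookup per priority value
def pvB_loop (low_Max : Int) (priority_Sorted : List Int) (is_Low_College : List Int)
    (row_of : PySem.Dict Int Int) : Nat → List Int → Int → Int → List Int
  | 0, seat, _, _ => seat    -- fuel exhausted: unreachable under Pre_
  | fuel + 1, seat, times, index =>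
    if times < low_Max then
      match PySem.List.pyGet? priority_Sorted index with
      | none => seat         -- Python raises IndexError; excluded by Pre_
      | some v =>
        match row_of.get? v with
        | none => seat       -- Python raises KeyError; excluded by Pre_
        | some row =>
          if PySem.List.pyGetD is_Low_College row 0 ≠ 0 then
            pvB_loop low_Max priority_Sorted is_Low_College row_of fuel
              (PySem.List.pySetD seat row (PySem.List.pyGetD seat row 0 + 1)) (times + 1) (index + 1)
          else
            pvB_loop low_Max priority_Sorted is_Low_College row_of fuel seat times (index + 1)
    else seat

def get_Low_proportional_alt (max_Seat : Int) (max_College : Int) (minimal_N : Int) (max_Associate : Int) (associated_Seat : List Int) (priority_Initial : List (List Int)) (priority_Sorted : List Int) (fixed_Seat : List Int) (College_Direct : List Int) : List Int :=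
  let low_Proportional_Seat := List.replicate (max max_College 0).toNat (0 : Int)   -- [0] * max(C, 0)
  let max_Low_Seat := PySem.Int.truncdiv max_Seat 2   -- int(max_Seat/2), exact for |max_Seat| ≤ 2^31
  let is_Low_College := (PySem.List.pyRange 0 max_College 1).map (fun i =>
      if max_Low_Seat > PySem.List.pyGetD associated_Seat i 0 ∧
         max_Seat > PySem.List.pyGetD fixed_Seat i 0 + PySem.List.pyGetD College_Direct i 0 then (1 : Int) else 0)
  -- first-occurrence map: priority value -> college row (one row-major scan over the slices)
  let row_of := (PySem.List.enumerate (PySem.List.slice priority_Initial none (some max_College)) 0).foldl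
      (fun d p => (PySem.List.slice p.2 none (some max_Seat)).foldl
        (fun d v => if d.contains v then d else d.insert v p.1) d) PySem.Dict.empty
  let low_Max := PySem.Int.truncdiv minimal_N 4       -- int(minimal_N/4)
  pvB_loop low_Max priority_Sorted is_Low_College row_of
    (priority_Sorted.length + max_Associate.natAbs + 1) low_Proportional_Seat 0 max_Associate

-- ===== PRECONDITION & SPEC =====
-- whether college row r is a "low college" (same test A's first loop performs)
def pvLowRowB (max_Seat : Int) (associated_Seat fixed_Seat College_Direct : List Int) (r : Int) : Bool :=
  decide (PySem.Int.truncdiv max_Seat 2 > PySem.List.pyGetD associated_Seat r 0 ∧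
          max_Seat > PySem.List.pyGetD fixed_Seat r 0 + PySem.List.pyGetD College_Direct r 0)

-- the grid region A scans: rows 0..max_College-1, columns 0..max_Seat-1, row-major
def pvCells (max_College max_Seat : Int) (priority_Initial : List (List Int)) : List Int :=
  (PySem.List.pyRange 0 max_College 1).flatMap (fun r =>
    (PySem.List.pyRange 0 max_Seat 1).map (fun c =>
      PySem.List.pyGetD (PySem.List.pyGetD priority_Initial r []) c 0))

-- the region cells lying in low-college rows
def pvLowCells (max_Seat max_College : Int) (priority_Initial : List (List Int))
    (associated_Seat fixed_Seat College_Direct : List Int) : List Int :=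
  (PySem.List.pyRange 0 max_College 1).flatMap (fun r =>
    if pvLowRowB max_Seat associated_Seat fixed_Seat College_Direct r then
      (PySem.List.pyRange 0 max_Seat 1).map (fun c =>
        PySem.List.pyGetD (PySem.List.pyGetD priority_Initial r []) c 0)
    else [])

-- step j of the walk reads a value that occurs in the scanned region
def pvGoodB (max_College max_Seat : Int) (priority_Initial : List (List Int))
    (priority_Sorted : List Int) (max_Associate : Int) (j : Nat) : Bool :=
  match PySem.List.pyGet? priority_Sorted (max_Associate + j) with
  | none => false
  | some v => (pvCells max_College max_Seat priority_Initial).contains v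

-- step j of the walk reads a value lying in a low-college row
def pvLowAtB (max_Seat max_College : Int) (priority_Initial : List (List Int))
    (priority_Sorted : List Int) (max_Associate : Int)
    (associated_Seat fixed_Seat College_Direct : List Int) (j : Nat) : Bool :=
  match PySem.List.pyGet? priority_Sorted (max_Associate + j) with
  | none => false
  | some v => (pvLowCells max_Seat max_College priority_Initial associated_Seat fixed_Seat College_Direct).contains v

-- Pre_ = exactly the inputs where A returns, MINUS those whose scanned grid region contains a
-- duplicated priority value: there A's missing `break` counts one priority several times in a
-- single step (an artefact of its never-firing breakAll flag) and B's first-occurrence dict does not.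
def Pre_get_Low_proportional (max_Seat : Int) (max_College : Int) (minimal_N : Int) (max_Associate : Int) (associated_Seat : List Int) (priority_Initial : List (List Int)) (priority_Sorted : List Int) (fixed_Seat : List Int) (College_Direct : List Int) : Prop :=
  max_College ≤ (associated_Seat.length : Int) ∧
  max_College ≤ (fixed_Seat.length : Int) ∧
  max_College ≤ (College_Direct.length : Int) ∧
  (0 < PySem.Int.truncdiv minimal_N 4 →
    max_College ≤ (priority_Initial.length : Int) ∧
    (∀ r ∈ PySem.List.pyRange 0 max_College 1,
      max_Seat ≤ ((PySem.List.pyGetD priority_Initial r []).length : Int)) ∧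
    (pvCells max_College max_Seat priority_Initial).Nodup ∧
    ∃ k ∈ List.range (2 * priority_Sorted.length + 2),
      1 ≤ k ∧
      (∀ j ∈ List.range k, pvGoodB max_College max_Seat priority_Initial priority_Sorted max_Associate j = true) ∧
      (((List.range k).countP (fun j => pvLowAtB max_Seat max_College priority_Initial priority_Sorted max_Associate associated_Seat fixed_Seat College_Direct j) : Int) = PySem.Int.truncdiv minimal_N 4) ∧
      pvLowAtB max_Seat max_College priority_Initial priority_Sorted max_Associate associated_Seat fixed_Seat College_Direct (k - 1) = true)
instance (max_Seat : Int) (max_College : Int) (minimal_N : Int) (max_Associate : Int) (associated_Seat : List Int) (priority_Initial : List (List Int)) (priority_Sorted : List Int) (fixed_Seat : List Int) (College_Direct : List Int) : Decidable (Pre_get_Low_proportional max_Seat max_College minimal_N max_Associate associated_Seat priority_Initial priority_Sorted fixed_Seat College_Direct) := by unfold Pre_get_Low_proportional; infer_instance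

def pvWitness_get_Low_proportional : Int × Int × Int × Int × List Int × List (List Int) × List Int × List Int × List Int :=
  (4, 2, 8, 1, [1, 1], [[10, 11, 12, 13], [20, 21, 22, 23]], [99, 11, 21, 20, 12], [0, 0], [0, 0])

def Spec_get_Low_proportional (max_Seat : Int) (max_College : Int) (minimal_N : Int) (max_Associate : Int) (associated_Seat : List Int) (priority_Initial : List (List Int)) (priority_Sorted : List Int) (fixed_Seat : List Int) (College_Direct : List Int) (out : List Int) : Prop := out = get_Low_proportional_alt max_Seat max_College minimal_N max_Associate associated_Seat priority_Initial priority_Sorted fixed_Seat College_Direct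
instance (max_Seat : Int) (max_College : Int) (minimal_N : Int) (max_Associate : Int) (associated_Seat : List Int) (priority_Initial : List (List Int)) (priority_Sorted : List Int) (fixed_Seat : List Int) (College_Direct : List Int) (out : List Int) : Decidable (Spec_get_Low_proportional max_Seat max_College minimal_N max_Associate associated_Seat priority_Initial priority_Sorted fixed_Seat College_Direct out) := by unfold Spec_get_Low_proportional; infer_instance

-- ===== CLAIM (what is proved, stated in full; the proofs are below) =====
def Claim_equal_get_Low_proportional : Prop := ∀ (max_Seat : Int) (max_College : Int) (minimal_N : Int) (max_Associate : Int) (associated_Seat : List Int) (priority_Initial : List (List Int)) (priority_Sorted : List Int) (fixed_Seat : List Int) (College_Direct : List Int), Dom_get_Low_proportional max_Seat max_College minimal_N max_Associate associated_Seat priority_Initial priority_Sorted fixed_Seat College_Direct → Pre_get_Low_proportional max_Seat max_College minimal_N max_Associate associated_Seat priority_Initial priority_Sorted fixed_Seat College_Direct → Spec_get_Low_proportional max_Seat max_College minimal_N max_Associate associated_Seat priority_Initial priority_Sorted fixed_Seat College_Direct (get_Low_proportional max_Seat max_College minimal_N max_Associate associated_Seat priority_Initial priority_Sorted fixed_Seat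 College_Direct)

-- ===== LEMMAS AND PROOFS =====

-- proof-only helpers: the scanned region as a flat row-major list of (value, row) pairs
def pvPairs (max_College max_Seat : Int) (grid : List (List Int)) : List (Int × Int) :=
  (PySem.List.pyRange 0 max_College 1).flatMap (fun r =>
    (PySem.List.pyRange 0 max_Seat 1).map (fun c =>
      (PySem.List.pyGetD (PySem.List.pyGetD grid r []) c 0, r)))

-- effect of A's match branch at row r (state (seat, times, index, breakAll))
def pvHit (isLow : List Int) (r : Int) (st : List Int × Int × Int × Bool) : List Int × Int × Int × Bool :=
  if PySem.List.pyGetD isLow r 0 ≠ 0 then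
    (PySem.List.pySetD st.1 r (PySem.List.pyGetD st.1 r 0 + 1), st.2.1 + 1, st.2.2.1 + 1, false)
  else (st.1, st.2.1, st.2.2.1 + 1, false)

def pvH (isLow : List Int) (value : Int) (st : List Int × Int × Int × Bool) (p : Int × Int) :
    List Int × Int × Int × Bool :=
  if value = p.1 then pvHit isLow p.2 st else st

def pvIns (d : PySem.Dict Int Int) (p : Int × Int) : PySem.Dict Int Int :=
  if d.contains p.1 then d else d.insert p.1 p.2

lemma pvPairs_map_fst (C S : Int) (grid : List (List Int)) :
    (pvPairs C S grid).map Prod.fst = pvCells C S grid := by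
  simp [pvPairs, pvCells, List.map_flatMap, List.map_map, Function.comp_def]

lemma pvPairs_mem_row {C S : Int} {grid : List (List Int)} {v r : Int}
    (h : (v, r) ∈ pvPairs C S grid) : 0 ≤ r ∧ r < C := by
  simp only [pvPairs, List.mem_flatMap, List.mem_map, PySem.List.mem_pyRange_one] at h
  obtain ⟨r', hr', c, hc, hp⟩ := h
  cases hp
  exact hr'

lemma pv_fst_nodup_unique : ∀ (ps : List (Int × Int)), (ps.map Prod.fst).Nodup →
    ∀ {v r r' : Int}, (v, r) ∈ ps → (v, r') ∈ ps → r = r' := by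
  intro ps
  induction ps with
  | nil => intro _ v r r' h; cases h
  | cons p tl ih =>
    intro hnd v r r' h1 h2
    simp only [List.map_cons, List.nodup_cons] at hnd
    rcases List.mem_cons.1 h1 with h1 | h1 <;> rcases List.mem_cons.1 h2 with h2 | h2
    · rw [← h1] at h2; cases h2; rfl
    · exfalso
      have hv : v ∈ List.map Prod.fst tl := List.mem_map.2 ⟨(v, r'), h2, rfl⟩
      have hp : p.1 = v := by rw [← h1]
      rw [← hp] at hv
      exact hnd.1 hv
    · exfalso
      have hv : v ∈ List.map Prod.fst tl := List.mem_map.2 ⟨(v, r), h1, rfl⟩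
      have hp : p.1 = v := by rw [← h2]
      rw [← hp] at hv
      exact hnd.1 hv
    · exact ih hnd.2 h1 h2

lemma pvH_no_match (isLow : List Int) (value : Int) :
    ∀ (ps : List (Int × Int)), value ∉ ps.map Prod.fst →
    ∀ st, ps.foldl (pvH isLow value) st = st := by
  intro ps
  induction ps with
  | nil => intro _ st; rfl
  | cons p tl ih =>
    intro h st
    simp only [List.map_cons, List.mem_cons, not_or] at h
    simp only [List.foldl_cons, pvH, if_neg h.1]
    exact ih h.2 st

lemma pvH_onehot (isLow : List Int) (value r : Int) :
    ∀ (ps : List (Int × Int)), (ps.map Prod.fst).Nodup → (value, r) ∈ ps →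
    ∀ st, ps.foldl (pvH isLow value) st = pvHit isLow r st := by
  intro ps
  induction ps with
  | nil => intro _ h; cases h
  | cons p tl ih =>
    intro hnd hm st
    simp only [List.map_cons, List.nodup_cons] at hnd
    rcases List.mem_cons.1 hm with hm | hm
    · cases hm
      simp only [List.foldl_cons, pvH]
      exact pvH_no_match isLow value tl hnd.1 _
    · have hne : value ≠ p.1 := by
        intro he
        exact hnd.1 (he ▸ List.mem_map_of_mem hm)
      simp only [List.foldl_cons, pvH, if_neg hne]
      exact ih hnd.2 hm st

lemma pvA_pass_eq_pairs (S C : Int) (grid : List (List Int)) (isLow : List Int) (value : Int)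
    (hshape : ∀ rr ∈ PySem.List.pyRange 0 C 1, S ≤ ((PySem.List.pyGetD grid rr []).length : Int))
    (st : List Int × Int × Int × Bool) :
    pvA_pass S C grid isLow value st = (pvPairs C S grid).foldl (pvH isLow value) st := by
  unfold pvA_pass pvPairs
  rw [List.foldl_flatMap]
  apply PySem.List.foldl_congr_mem
  intro acc rr hrr
  rw [List.foldl_map]
  apply PySem.List.foldl_congr_mem
  intro acc2 c hc
  obtain ⟨hc0, hcS⟩ := PySem.List.mem_pyRange_one.1 hc
  have hlen : c < ((PySem.List.pyGetD grid rr []).length : Int) := lt_of_lt_of_le hcS (hshape rr hrr)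
  have hsome := PySem.List.pyGet?_eq_some_getElem (PySem.List.pyGetD grid rr []) hc0 hlen
  have hgetD := PySem.List.pyGetD_eq_getElem (PySem.List.pyGetD grid rr []) (0 : Int) hc0 hlen
  rw [hsome, hgetD]
  rfl

lemma pvIns_get? : ∀ (ps : List (Int × Int)) (d : PySem.Dict Int Int) (v : Int),
    (ps.foldl pvIns d).get? v =
      (d.get? v).or ((ps.find? (fun p => p.1 == v)).map Prod.snd) := by
  intro ps
  induction ps with
  | nil => intro d v; simp
  | cons p tl ih =>
    intro d v
    simp only [List.foldl_cons, ih]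
    by_cases hv : p.1 = v
    · rw [List.find?_cons_of_pos (by simp [hv])]
      subst hv
      by_cases hc : d.contains p.1
      · have : ∃ w, d.get? p.1 = some w := by
          rcases h : d.get? p.1 with _ | w
          · rw [PySem.Dict.get?_eq_none_iff_contains] at h
            rw [h] at hc; cases hc
          · exact ⟨w, rfl⟩
        obtain ⟨w, hw⟩ := this
        simp [pvIns, hc, hw]
      · have hnone : d.get? p.1 = none := by
          rw [PySem.Dict.get?_eq_none_iff_contains]
          exact Bool.eq_false_iff.2 hc
        simp [pvIns, hc, hnone]
    · rw [List.find?_cons_of_neg (by simp [hv])]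
      by_cases hc : d.contains p.1
      · simp [pvIns, hc]
      · simp [pvIns, hc, PySem.Dict.get?_insert, Ne.symm hv]

lemma pv_find?_of_mem_nodup : ∀ (ps : List (Int × Int)), (ps.map Prod.fst).Nodup →
    ∀ {v r : Int}, (v, r) ∈ ps → ps.find? (fun p => p.1 == v) = some (v, r) := by
  intro ps
  induction ps with
  | nil => intro _ v r h; cases h
  | cons p tl ih =>
    intro hnd v r hm
    simp only [List.map_cons, List.nodup_cons] at hnd
    rcases List.mem_cons.1 hm with hm | hm
    · cases hm
      exact List.find?_cons_of_pos (by simp)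
    · have hne : p.1 ≠ v := by
        intro he
        exact hnd.1 (he ▸ List.mem_map_of_mem hm)
      rw [List.find?_cons_of_neg (by simp [hne])]
      exact ih hnd.2 hm

lemma pvDictB_eq_pairs (C S : Int) (grid : List (List Int))
    (hC0 : 0 ≤ C) (hC : C ≤ (grid.length : Int)) (hS : 0 ≤ S)
    (hshape : ∀ rr ∈ PySem.List.pyRange 0 C 1, S ≤ ((PySem.List.pyGetD grid rr []).length : Int)) :
    (PySem.List.enumerate (PySem.List.slice grid none (some C)) 0).foldl
      (fun d p => (PySem.List.slice p.2 none (some S)).foldl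
        (fun d v => if d.contains v then d else d.insert v p.1) d) PySem.Dict.empty
    = (pvPairs C S grid).foldl pvIns PySem.Dict.empty := by
  rw [PySem.List.slice_to grid hC0]
  rw [PySem.List.enumerate_eq_map_pyRange (List.take C.toNat grid) []]
  rw [List.foldl_map]
  have hlentake : ((List.take C.toNat grid).length : Int) = C := by
    simp [List.length_take]
    omega
  rw [show PySem.List.len (List.take C.toNat grid) = C by
    rw [PySem.List.len_eq]; push_cast [List.length_take]; omega]
  unfold pvPairs
  rw [List.foldl_flatMap]
  apply PySem.List.foldl_congr_mem
  intro d rr hrr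
  obtain ⟨hr0, hrC⟩ := PySem.List.mem_pyRange_one.1 hrr
  -- the enumerated row is the real row
  have hrow : PySem.List.pyGetD (List.take C.toNat grid) rr [] = PySem.List.pyGetD grid rr [] := by
    have h1 : rr < ((List.take C.toNat grid).length : Int) := by omega
    have h2 : rr < (grid.length : Int) := by omega
    rw [PySem.List.pyGetD_eq_getElem _ _ hr0 h1, PySem.List.pyGetD_eq_getElem _ _ hr0 h2]
    rw [List.getElem_take]
  rw [hrow]
  set row := PySem.List.pyGetD grid rr [] with hrowdef
  have hSrow : S ≤ (row.length : Int) := hshape rr hrr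
  rw [List.foldl_map]
  -- right side: fold over the column range reading row; left: fold over row.take S.toNat
  rw [PySem.List.slice_to row hS]
  have hlen2 : ((List.take S.toNat row).length : Int) = S := by
    simp [List.length_take]
    omega
  have hcongr : (PySem.List.pyRange 0 S 1).foldl
        (fun d c => pvIns d (PySem.List.pyGetD row c 0, rr)) d
      = (PySem.List.pyRange 0 S 1).foldl
        (fun d c => pvIns d (PySem.List.pyGetD (List.take S.toNat row) c 0, rr)) d := by
    apply PySem.List.foldl_congr_mem
    intro acc c hc
    obtain ⟨hc0, hcS⟩ := PySem.List.mem_pyRange_one.1 hc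
    have e : PySem.List.pyGetD row c 0 = PySem.List.pyGetD (List.take S.toNat row) c 0 := by
      rw [PySem.List.pyGetD_eq_getElem _ _ hc0 (by omega),
          PySem.List.pyGetD_eq_getElem _ _ hc0 (by omega)]
      rw [List.getElem_take]
    rw [e]
  rw [hcongr]
  have hfix : (fun (d : PySem.Dict Int Int) v => if d.contains v = true then d else d.insert v (rr, row).1)
      = (fun (d : PySem.Dict Int Int) v => if d.contains v = true then d else d.insert v rr) := rfl
  rw [hfix,
    ← PySem.List.foldl_pyRange_zero_pyGetD (List.take S.toNat row) 0
      (fun (d : PySem.Dict Int Int) v => if d.contains v = true then d else d.insert v rr) d,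
    show PySem.List.len (List.take S.toNat row) = S by
      rw [PySem.List.len_eq]; push_cast [List.length_take]; omega]
  apply PySem.List.foldl_congr_mem
  intro acc c _
  rfl

lemma pvFoldSet_getElem? (cond : Int → Prop) [DecidablePred cond] :
    ∀ (n : Nat) (l : List Int),
      (((PySem.List.pyRange 0 (n : Int) 1).foldl
          (fun l i => if cond i then PySem.List.pySetD l i 1 else l) l).length = l.length) ∧
      (∀ j : Nat, ((PySem.List.pyRange 0 (n : Int) 1).foldl
          (fun l i => if cond i then PySem.List.pySetD l i 1 else l) l)[j]? =
        if j < n ∧ cond (j : Int) then l[j]?.map (fun _ => (1 : Int)) else l[j]?) := by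
  intro n
  induction n with
  | zero =>
    intro l
    simp [PySem.List.pyRange_one_eq_nil (by norm_num : (0:Int) ≤ 0)]
  | succ n ih =>
    intro l
    obtain ⟨ihlen, ihget⟩ := ih l
    have hcast : ((n + 1 : Nat) : Int) = (n : Int) + 1 := by push_cast; ring
    rw [hcast, PySem.List.pyRange_one_succ_right (by positivity), List.foldl_append]
    set res := (PySem.List.pyRange 0 (n : Int) 1).foldl
        (fun l i => if cond i then PySem.List.pySetD l i 1 else l) l with hres
    simp only [List.foldl_cons, List.foldl_nil]
    by_cases hcn : cond (n : Int)
    · rw [if_pos hcn, PySem.List.pySetD_natCast]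
      constructor
      · simp [ihlen]
      · intro j
        rw [List.getElem?_set]
        by_cases hj : n = j
        · subst hj
          simp only [ihlen]
          rw [ihget n]
          simp only [lt_irrefl, false_and, if_false]
          by_cases hn : n < l.length
          · simp [hn, hcn]
          · simp [hn, hcn]
        · rw [if_neg hj, ihget j]
          have : (j < n + 1 ∧ cond (j : Int)) ↔ (j < n ∧ cond (j : Int)) := by
            constructor
            · rintro ⟨h1, h2⟩; exact ⟨by omega, h2⟩
            · rintro ⟨h1, h2⟩; exact ⟨by omega, h2⟩
          rw [if_congr this rfl rfl]
    · rw [if_neg hcn]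
      refine ⟨ihlen, fun j => ?_⟩
      rw [ihget j]
      have : (j < n + 1 ∧ cond (j : Int)) ↔ (j < n ∧ cond (j : Int)) := by
        constructor
        · rintro ⟨h1, h2⟩
          rcases Nat.lt_succ_iff_lt_or_eq.1 h1 with h | h
          · exact ⟨h, h2⟩
          · subst h; exact absurd h2 hcn
        · rintro ⟨h1, h2⟩; exact ⟨by omega, h2⟩
      rw [if_congr this rfl rfl]

lemma pvIsLow_eq (C : Int) (cond : Int → Prop) [DecidablePred cond] :
    (PySem.List.pyRange 0 C 1).foldl (fun l i => if cond i then PySem.List.pySetD l i 1 else l)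
      ((PySem.List.pyRange 0 C 1).map (fun _ => (0 : Int)))
    = (PySem.List.pyRange 0 C 1).map (fun i => if cond i then (1 : Int) else 0) := by
  by_cases h : C ≤ 0
  · simp [PySem.List.pyRange_one_eq_nil h]
  · have hCn : C = ((C.toNat : Nat) : Int) := by omega
    rw [hCn]
    set n := C.toNat with hn
    obtain ⟨hlen, hget⟩ := pvFoldSet_getElem? cond n ((PySem.List.pyRange 0 (n : Int) 1).map (fun _ => (0 : Int)))
    apply List.ext_getElem?
    intro j
    rw [hget j]
    have hinit : ∀ j : Nat, ((PySem.List.pyRange 0 (n : Int) 1).map (fun _ => (0 : Int)))[j]? =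
        if j < n then some (0 : Int) else none := by
      intro j
      rw [List.getElem?_map, PySem.List.getElem?_pyRange_one]
      by_cases hj : j < n <;> simp [hj]
    have hout : ∀ j : Nat, ((PySem.List.pyRange 0 (n : Int) 1).map (fun i => if cond i then (1 : Int) else 0))[j]? =
        if j < n then some (if cond (j : Int) then (1 : Int) else 0) else none := by
      intro j
      rw [List.getElem?_map, PySem.List.getElem?_pyRange_one]
      by_cases hj : j < n <;> simp [hj]
    rw [hinit j, hout j]
    by_cases hj : j < n
    · by_cases hc : cond (j : Int) <;> simp [hj, hc]
    · simp [hj]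

lemma pv_mem_cells {C S : Int} {grid : List (List Int)} {v : Int} :
    v ∈ pvCells C S grid ↔ ∃ r, (v, r) ∈ pvPairs C S grid := by
  rw [← pvPairs_map_fst]
  constructor
  · intro h
    obtain ⟨p, hp, he⟩ := List.mem_map.1 h
    exact ⟨p.2, by rwa [show (v, p.2) = p by rw [← he]]⟩
  · rintro ⟨r, hr⟩
    exact List.mem_map.2 ⟨(v, r), hr, rfl⟩

lemma pv_mem_lowCells {S C : Int} {grid : List (List Int)} {assoc fixedS direct : List Int}
    {v r : Int} (hnd : (pvCells C S grid).Nodup) (hvr : (v, r) ∈ pvPairs C S grid) :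
    (v ∈ pvLowCells S C grid assoc fixedS direct ↔ pvLowRowB S assoc fixedS direct r = true) := by
  have hndp : ((pvPairs C S grid).map Prod.fst).Nodup := by rwa [pvPairs_map_fst]
  constructor
  · intro h
    simp only [pvLowCells, List.mem_flatMap] at h
    obtain ⟨r', hr', hv⟩ := h
    by_cases hlow : pvLowRowB S assoc fixedS direct r' = true
    · rw [if_pos hlow] at hv
      have : (v, r') ∈ pvPairs C S grid := by
        simp only [pvPairs, List.mem_flatMap]
        exact ⟨r', hr', by
          obtain ⟨c, hc, he⟩ := List.mem_map.1 hv
          exact List.mem_map.2 ⟨c, hc, by rw [he]⟩⟩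
      rwa [pv_fst_nodup_unique _ hndp hvr this]
    · rw [if_neg hlow] at hv
      cases hv
  · intro hlow
    simp only [pvPairs, List.mem_flatMap] at hvr
    obtain ⟨r', hr', hv⟩ := hvr
    obtain ⟨c, hc, he⟩ := List.mem_map.1 hv
    have hrr : r' = r := by cases he; rfl
    subst hrr
    simp only [pvLowCells, List.mem_flatMap]
    refine ⟨r', hr', ?_⟩
    rw [if_pos hlow]
    exact List.mem_map.2 ⟨c, hc, by cases he; rfl⟩

lemma pvA_loop_stop (low_Max max_Seat max_College : Int) (grid : List (List Int))
    (sorted isLow : List Int) (times index : Int) (h : ¬ times < low_Max) :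
    ∀ (fuel : Nat) (seat : List Int),
      pvA_loop low_Max max_Seat max_College grid sorted isLow fuel seat times index = seat := by
  intro fuel seat
  cases fuel <;> simp [pvA_loop, h]

lemma pvB_loop_stop (low_Max : Int) (sorted isLow : List Int) (dict : PySem.Dict Int Int)
    (times index : Int) (h : ¬ times < low_Max) :
    ∀ (fuel : Nat) (seat : List Int),
      pvB_loop low_Max sorted isLow dict fuel seat times index = seat := by
  intro fuel seat
  cases fuel <;> simp [pvB_loop, h]

lemma pv_loop_eq
    (lowMax S C mA : Int) (grid : List (List Int)) (sorted : List Int)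
    (assoc fixedS direct : List Int) (isLow : List Int) (dict : PySem.Dict Int Int)
    (hIsLow : ∀ r : Int, 0 ≤ r → r < C →
        (PySem.List.pyGetD isLow r 0 ≠ 0 ↔ pvLowRowB S assoc fixedS direct r = true))
    (hshape : ∀ rr ∈ PySem.List.pyRange 0 C 1, S ≤ ((PySem.List.pyGetD grid rr []).length : Int))
    (hnd : (pvCells C S grid).Nodup)
    (hdict : ∀ v r : Int, (v, r) ∈ pvPairs C S grid → dict.get? v = some r) :
    ∀ (k j fuel : Nat) (seat : List Int) (times : Int),
      k ≤ fuel →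
      (∀ i, i < k → pvGoodB C S grid sorted mA (j + i) = true) →
      times + (((List.range k).countP
          (fun i => pvLowAtB S C grid sorted mA assoc fixedS direct (j + i)) : Nat) : Int) = lowMax →
      (k = 0 ∨ pvLowAtB S C grid sorted mA assoc fixedS direct (j + (k - 1)) = true) →
      pvA_loop lowMax S C grid sorted isLow fuel seat times (mA + j) =
      pvB_loop lowMax sorted isLow dict fuel seat times (mA + j) := by
  intro k
  induction k with
  | zero =>
    intro j fuel seat times _ _ hcount _
    simp only [List.range_zero, List.countP_nil, Nat.cast_zero, add_zero] at hcount
    have hstop : ¬ times < lowMax := by omega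
    rw [pvA_loop_stop _ _ _ _ _ _ _ _ hstop, pvB_loop_stop _ _ _ _ _ _ hstop]
  | succ k ih =>
    intro j fuel seat times hfuel hgood hcount hlast
    have hlastk : pvLowAtB S C grid sorted mA assoc fixedS direct (j + k) = true := by
      rcases hlast with h | h
      · cases h
      · simpa using h
    have hpos : 0 < (List.range (k + 1)).countP
        (fun i => pvLowAtB S C grid sorted mA assoc fixedS direct (j + i)) := by
      rw [List.countP_pos_iff]
      exact ⟨k, List.mem_range.2 (by omega), hlastk⟩
    have hlt : times < lowMax := by omega
    obtain ⟨f, rfl⟩ : ∃ f, fuel = f + 1 := ⟨fuel - 1, by omega⟩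
    have hg0 := hgood 0 (by omega)
    rw [Nat.add_zero] at hg0
    unfold pvGoodB at hg0
    rcases hv : PySem.List.pyGet? sorted (mA + (j : Int)) with _ | v
    · rw [hv] at hg0; cases hg0
    rw [hv] at hg0
    have hvmem : v ∈ pvCells C S grid := List.contains_iff_mem.1 hg0
    obtain ⟨r0, hr0⟩ := pv_mem_cells.1 hvmem
    obtain ⟨hr00, hr0C⟩ := pvPairs_mem_row hr0
    have hndp : ((pvPairs C S grid).map Prod.fst).Nodup := by rwa [pvPairs_map_fst]
    have hlowiff : (PySem.List.pyGetD isLow r0 0 ≠ 0) ↔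
        pvLowAtB S C grid sorted mA assoc fixedS direct j = true := by
      rw [hIsLow r0 hr00 hr0C]
      unfold pvLowAtB
      rw [hv, List.contains_iff_mem]
      exact (pv_mem_lowCells hnd hr0).symm
    have hidx : mA + (j : Int) + 1 = mA + ((j + 1 : Nat) : Int) := by push_cast; ring
    have hsplit : (List.range (k + 1)).countP
          (fun i => pvLowAtB S C grid sorted mA assoc fixedS direct (j + i)) =
        (List.range k).countP
          (fun i => pvLowAtB S C grid sorted mA assoc fixedS direct (j + (i + 1))) +
        (if pvLowAtB S C grid sorted mA assoc fixedS direct (j + 0) then 1 else 0) := by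
      rw [List.range_succ_eq_map, List.countP_cons, List.countP_map]
      rfl
    have hshiftfun : (fun i => pvLowAtB S C grid sorted mA assoc fixedS direct (j + (i + 1))) =
        (fun i => pvLowAtB S C grid sorted mA assoc fixedS direct ((j + 1) + i)) := by
      funext i
      rw [show j + (i + 1) = (j + 1) + i from by omega]
    have hgood' : ∀ i, i < k → pvGoodB C S grid sorted mA ((j + 1) + i) = true := by
      intro i hi
      rw [show (j + 1) + i = j + (i + 1) from by omega]
      exact hgood (i + 1) (by omega)
    have hA : pvA_loop lowMax S C grid sorted isLow (f + 1) seat times (mA + (j : Int)) =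
        (if PySem.List.pyGetD isLow r0 0 ≠ 0 then
          pvA_loop lowMax S C grid sorted isLow f
            (PySem.List.pySetD seat r0 (PySem.List.pyGetD seat r0 0 + 1)) (times + 1)
            (mA + (j : Int) + 1)
        else pvA_loop lowMax S C grid sorted isLow f seat times (mA + (j : Int) + 1)) := by
      simp only [pvA_loop, if_pos hlt, hv]
      rw [pvA_pass_eq_pairs S C grid isLow v hshape, pvH_onehot isLow v r0 _ hndp hr0]
      unfold pvHit
      by_cases hlow : PySem.List.pyGetD isLow r0 0 ≠ 0
      · rw [if_pos hlow, if_pos hlow]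
        simp
      · rw [if_neg hlow, if_neg hlow]
        simp
    have hB : pvB_loop lowMax sorted isLow dict (f + 1) seat times (mA + (j : Int)) =
        (if PySem.List.pyGetD isLow r0 0 ≠ 0 then
          pvB_loop lowMax sorted isLow dict f
            (PySem.List.pySetD seat r0 (PySem.List.pyGetD seat r0 0 + 1)) (times + 1)
            (mA + (j : Int) + 1)
        else pvB_loop lowMax sorted isLow dict f seat times (mA + (j : Int) + 1)) := by
      simp only [pvB_loop, if_pos hlt, hv, hdict v r0 hr0]
    rw [hA, hB]
    by_cases hlow : PySem.List.pyGetD isLow r0 0 ≠ 0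
    · rw [if_pos hlow, if_pos hlow, hidx]
      have hlowj : pvLowAtB S C grid sorted mA assoc fixedS direct j = true := hlowiff.1 hlow
      apply ih (j + 1) f _ (times + 1) (by omega) hgood'
      · rw [← hshiftfun]
        have : (if pvLowAtB S C grid sorted mA assoc fixedS direct (j + 0) then 1 else 0) = 1 := by
          rw [Nat.add_zero, hlowj]; rfl
        rw [hsplit, this] at hcount
        push_cast at hcount ⊢
        omega
      · rcases Nat.eq_zero_or_pos k with hk | hk
        · exact Or.inl hk
        · refine Or.inr ?_
          rw [show (j + 1) + (k - 1) = j + k from by omega]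
          exact hlastk
    · rw [if_neg hlow, if_neg hlow, hidx]
      have hlowj : pvLowAtB S C grid sorted mA assoc fixedS direct j = false := by
        rcases Bool.eq_false_or_eq_true (pvLowAtB S C grid sorted mA assoc fixedS direct j) with h | h
        · exact absurd (hlowiff.2 h) hlow
        · exact h
      rcases Nat.eq_zero_or_pos k with hk | hk
      · exfalso
        subst hk
        rw [Nat.add_zero, hlowj] at hlastk
        cases hlastk
      · apply ih (j + 1) f seat times (by omega) hgood'
        · rw [← hshiftfun]
          have : (if pvLowAtB S C grid sorted mA assoc fixedS direct (j + 0) then 1 else 0) = 0 := by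
            rw [Nat.add_zero, hlowj]; rfl
          rw [hsplit, this] at hcount
          push_cast at hcount ⊢
          omega
        · refine Or.inr ?_
          rw [show (j + 1) + (k - 1) = j + k from by omega]
          exact hlastk

theorem pvWitness_ok :
    Dom_get_Low_proportional 4 2 8 1 [1, 1] [[10, 11, 12, 13], [20, 21, 22, 23]] [99, 11, 21, 20, 12] [0, 0] [0, 0] ∧
    Pre_get_Low_proportional 4 2 8 1 [1, 1] [[10, 11, 12, 13], [20, 21, 22, 23]] [99, 11, 21, 20, 12] [0, 0] [0, 0] := by
  decide

lemma pvSeat0_eq (C : Int) :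
    (PySem.List.pyRange 0 C 1).map (fun _ => (0 : Int)) = List.replicate (max C 0).toNat 0 := by
  rw [PySem.List.pyRange_one, List.map_map]
  simp only [Function.comp_def]
  rw [List.map_const', List.length_range]
  congr 1
  omega

-- ===== VERDICT (by name: the statement is the Claim_ definition above) =====
theorem get_Low_proportional_spec : Claim_equal_get_Low_proportional := by
  unfold Claim_equal_get_Low_proportional
  intro mS C mN mA assoc grid sorted fixedS direct _hdom hpre
  unfold Spec_get_Low_proportional
  obtain ⟨_h1, _h2, _h3, hrest⟩ := hpre
  simp only [get_Low_proportional, get_Low_proportional_alt]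
  rw [pvIsLow_eq C (fun i => PySem.Int.truncdiv mS 2 > PySem.List.pyGetD assoc i 0 ∧
      mS > PySem.List.pyGetD fixedS i 0 + PySem.List.pyGetD direct i 0),
    pvSeat0_eq C]
  by_cases hmax : PySem.Int.truncdiv mN 4 ≤ 0
  · rw [pvA_loop_stop _ _ _ _ _ _ _ _ (by omega), pvB_loop_stop _ _ _ _ _ _ (by omega)]
  · obtain ⟨hlenG, hshape, hnd, k, hkmem, hk1, hgood, hcount, hlast⟩ := hrest (by omega)
    -- a first good step forces a nonempty scanned region
    have hg0 := hgood 0 (List.mem_range.2 (by omega))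
    unfold pvGoodB at hg0
    rcases hv0 : PySem.List.pyGet? sorted (mA + ((0 : Nat) : Int)) with _ | v0
    · rw [hv0] at hg0; cases hg0
    rw [hv0] at hg0
    have hv0mem : v0 ∈ pvCells C mS grid := List.contains_iff_mem.1 hg0
    obtain ⟨r0, hr0⟩ := pv_mem_cells.1 hv0mem
    obtain ⟨hr00, hr0C⟩ := pvPairs_mem_row hr0
    have hC0 : (0 : Int) ≤ C := le_trans hr00 (le_of_lt hr0C)
    have hS0 : (0 : Int) ≤ mS := by
      simp only [pvCells, List.mem_flatMap, List.mem_map] at hv0mem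
      obtain ⟨r', _, c, hc, _⟩ := hv0mem
      obtain ⟨hc0, hcS⟩ := PySem.List.mem_pyRange_one.1 hc
      omega
    have hndp : ((pvPairs C mS grid).map Prod.fst).Nodup := by rwa [pvPairs_map_fst]
    have hdict : ∀ v r : Int, (v, r) ∈ pvPairs C mS grid →
        ((PySem.List.enumerate (PySem.List.slice grid none (some C)) 0).foldl
          (fun d p => (PySem.List.slice p.2 none (some mS)).foldl
            (fun d v => if d.contains v then d else d.insert v p.1) d)
          PySem.Dict.empty).get? v = some r := by
      intro v r hvr
      rw [pvDictB_eq_pairs C mS grid hC0 hlenG hS0 hshape, pvIns_get?,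
        pv_find?_of_mem_nodup _ hndp hvr]
      simp
    have hIsLow : ∀ r : Int, 0 ≤ r → r < C →
        (PySem.List.pyGetD ((PySem.List.pyRange 0 C 1).map (fun i =>
            if PySem.Int.truncdiv mS 2 > PySem.List.pyGetD assoc i 0 ∧
               mS > PySem.List.pyGetD fixedS i 0 + PySem.List.pyGetD direct i 0 then (1 : Int) else 0)) r 0 ≠ 0 ↔
          pvLowRowB mS assoc fixedS direct r = true) := by
      intro r h0 hC
      rw [PySem.List.pyGetD_map_pyRange_of_nonneg _ C r _ h0 hC]
      unfold pvLowRowB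
      by_cases hcond : PySem.Int.truncdiv mS 2 > PySem.List.pyGetD assoc r 0 ∧
          mS > PySem.List.pyGetD fixedS r 0 + PySem.List.pyGetD direct r 0
      · simp [hcond]
      · simp [hcond]
    -- k ≤ fuel: step k-1 reads a valid index, so mA + (k-1) < sorted.length
    have hk : k ≤ sorted.length + mA.natAbs + 1 := by
      have hgl := hgood (k - 1) (List.mem_range.2 (by omega))
      unfold pvGoodB at hgl
      rcases hx : PySem.List.pyGet? sorted (mA + ((k - 1 : Nat) : Int)) with _ | v
      · rw [hx] at hgl; cases hgl
      · have hnn : ¬ PySem.List.pyGet? sorted (mA + ((k - 1 : Nat) : Int)) = none := by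
          rw [hx]; simp
        have hir : PySem.Raise.InRange sorted.length (mA + ((k - 1 : Nat) : Int)) := by
          by_contra hcon
          exact hnn ((PySem.List.pyGet?_eq_none_iff sorted _).2 hcon)
        unfold PySem.Raise.InRange at hir
        omega
    have hgood' : ∀ i, i < k → pvGoodB C mS grid sorted mA (0 + i) = true := by
      intro i hi
      rw [Nat.zero_add]
      exact hgood i (List.mem_range.2 hi)
    have hcount' : (0 : Int) + (((List.range k).countP
        (fun i => pvLowAtB mS C grid sorted mA assoc fixedS direct (0 + i)) : Nat) : Int) =
        PySem.Int.truncdiv mN 4 := by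
      rw [show (fun i => pvLowAtB mS C grid sorted mA assoc fixedS direct (0 + i)) =
          (fun i => pvLowAtB mS C grid sorted mA assoc fixedS direct i) from by
        funext i; rw [Nat.zero_add]]
      rw [zero_add]
      exact hcount
    have hlast' : k = 0 ∨ pvLowAtB mS C grid sorted mA assoc fixedS direct (0 + (k - 1)) = true := by
      refine Or.inr ?_
      rw [Nat.zero_add]
      exact hlast
    have := pv_loop_eq (PySem.Int.truncdiv mN 4) mS C mA grid sorted assoc fixedS direct _ _
      hIsLow hshape hnd hdict k 0 (sorted.length + mA.natAbs + 1)
      (List.replicate (max C 0).toNat 0) 0 hk hgood' hcount' hlast'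
    simpa using this
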